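-- pv_equiv track=rewrite | github.com/SarkiMudboy/auto-translate | russian.py | crawl_spaces
-- ===== SOURCE A (Python) =====
-- def crawl_spaces(line, pos='end'):
--
--     if pos!='end':
--         forward_index = 0
--         if line[forward_index] == ' ':
--             while line[forward_index] == ' ':
--                 forward_index += 1
--         return line[forward_index], forward_index
--     else:
--         reverse_index = -1
--         if line[reverse_index] == ' ':
--             while line[reverse_index] == ' ':
--                 reverse_index -= 1
--         return line[reverse_index], reverse_index
-- ===== SOURCE B (Python) =====
-- def crawl_spaces(line, pos='end'):
--     if pos != 'end':
--         i = len(line) - len(line.lstrip(' '))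
--         return line[i], i
--     else:
--         i = -(len(line) - len(line.rstrip(' '))) - 1
--         return line[i], i
-- ===== Notes on version B (the rewrite author's own statement) =====
-- stated objective: simpler
-- what changed: Replaces the explicit while-loop scans with closed-form index arithmetic: the index is derived from the length difference of lstrip(' ')/rstrip(' '), and the character read once by that index.
import Mathlib
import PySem

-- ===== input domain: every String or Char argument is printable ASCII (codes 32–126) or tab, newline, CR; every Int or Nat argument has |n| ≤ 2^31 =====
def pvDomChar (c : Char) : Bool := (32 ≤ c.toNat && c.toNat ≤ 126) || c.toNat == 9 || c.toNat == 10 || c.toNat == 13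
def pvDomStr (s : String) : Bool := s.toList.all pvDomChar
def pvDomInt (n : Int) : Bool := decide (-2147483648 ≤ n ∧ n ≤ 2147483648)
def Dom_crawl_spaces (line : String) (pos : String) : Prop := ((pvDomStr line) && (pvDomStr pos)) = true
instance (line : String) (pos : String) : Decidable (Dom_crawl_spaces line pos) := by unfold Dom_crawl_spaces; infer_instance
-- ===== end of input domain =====

-- B replaces A's explicit while-loop scans by closed-form index arithmetic from lstrip(' ')/rstrip(' ') length differences (objective: simpler).

-- ===== PORT A =====
-- while line[forward_index] == ' ': forward_index += 1   — structural recursion over the characters from the front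
def pvCrawlFwd (cs : List Char) (i : Nat) : Option (Char × Nat) :=
  match cs with
  | [] => none
  | c :: rest => if c == ' ' then pvCrawlFwd rest (i + 1) else some (c, i)

-- while line[reverse_index] == ' ': reverse_index -= 1   — structural recursion over the characters from the back
def pvCrawlRev (cs : List Char) (i : Int) : Option (Char × Int) :=
  match cs with
  | [] => none
  | c :: rest => if c == ' ' then pvCrawlRev rest (i - 1) else some (c, i)

def crawl_spaces (line : String) (pos : String) : String × Int :=
  if pos ≠ "end" then
    match pvCrawlFwd line.toList 0 with
    | some (c, i) => (String.mk [c], (i : Int))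
    | none => ("", 0)   -- Python raises IndexError here; excluded by Pre_
  else
    match pvCrawlRev line.toList.reverse (-1) with
    | some (c, i) => (String.mk [c], i)
    | none => ("", 0)   -- Python raises IndexError here; excluded by Pre_

-- ===== PORT B =====
-- line.lstrip(' ') / line.rstrip(' ') ported by hand as dropWhile on the (reversed) char list: exact, since only ' ' is stripped.
def crawl_spaces_alt (line : String) (pos : String) : String × Int :=
  let cs := line.toList
  if pos ≠ "end" then
    let i : Int := (cs.length : Int) - ((cs.dropWhile (· == ' ')).length : Int)
    match PySem.List.pyGet? cs i with
    | some c => (String.mk [c], i)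
    | none => ("", i)   -- Python raises IndexError here; excluded by Pre_
  else
    let i : Int := -((cs.length : Int) - (((cs.reverse.dropWhile (· == ' ')).reverse).length : Int)) - 1
    match PySem.List.pyGet? cs i with
    | some c => (String.mk [c], i)
    | none => ("", i)   -- Python raises IndexError here; excluded by Pre_

-- ===== PRECONDITION & SPEC =====
-- A raises IndexError exactly when the line is empty or all spaces (both branches run off the end); excluded.
def Pre_crawl_spaces (line : String) (pos : String) : Prop := (line.toList.any (· ≠ ' ')) = true
instance (line : String) (pos : String) : Decidable (Pre_crawl_spaces line pos) := by unfold Pre_crawl_spaces; infer_instance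

def pvWitness_crawl_spaces : String × String := ("  hi ", "end")

def Spec_crawl_spaces (line : String) (pos : String) (out : String × Int) : Prop := out = crawl_spaces_alt line pos
instance (line : String) (pos : String) (out : String × Int) : Decidable (Spec_crawl_spaces line pos out) := by unfold Spec_crawl_spaces; infer_instance

-- ===== CLAIM (what is proved, stated in full; the proofs are below) =====
def Claim_equal_crawl_spaces : Prop := ∀ (line : String) (pos : String), Dom_crawl_spaces line pos → Pre_crawl_spaces line pos → Spec_crawl_spaces line pos (crawl_spaces line pos)

-- ===== LEMMAS AND PROOFS =====

theorem pvCrawlFwd_eq (cs : List Char) (i : Nat) :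
    pvCrawlFwd cs i = (cs.dropWhile (· == ' ')).head?.map
      (fun c => (c, i + (cs.takeWhile (· == ' ')).length)) := by
  induction cs generalizing i with
  | nil => simp [pvCrawlFwd]
  | cons c rest ih =>
    by_cases h : c = ' '
    · simp [pvCrawlFwd, h, List.dropWhile, List.takeWhile, ih]
      cases (rest.dropWhile (· == ' ')).head? <;> simp [Nat.add_assoc, Nat.add_comm 1]
    · simp [pvCrawlFwd, h, List.dropWhile_cons, List.takeWhile_cons, h]

theorem pvCrawlRev_eq (cs : List Char) (i : Int) :
    pvCrawlRev cs i = (cs.dropWhile (· == ' ')).head?.map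
      (fun c => (c, i - (cs.takeWhile (· == ' ')).length)) := by
  induction cs generalizing i with
  | nil => simp [pvCrawlRev]
  | cons c rest ih =>
    by_cases h : c = ' '
    · simp [pvCrawlRev, h, List.dropWhile, List.takeWhile, ih]
      cases (rest.dropWhile (· == ' ')).head? <;> simp; ring
    · simp [pvCrawlRev, h, List.dropWhile_cons, List.takeWhile_cons, h]

-- indexing at the length of the space prefix reads the head of the stripped list
theorem pvGetElem_append_len {α : Type} (a b : List α) : (a ++ b)[a.length]? = b.head? := by
  rw [List.getElem?_append_right (le_refl _)]
  simp [List.head?_eq_getElem?]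

-- indexing at the length of the space prefix reads the head of the stripped list
theorem pvGet_takeWhile_len (cs : List Char) :
    cs[(cs.takeWhile (· == ' ')).length]? = (cs.dropWhile (· == ' ')).head? := by
  have h := pvGetElem_append_len (cs.takeWhile (· == ' ')) (cs.dropWhile (· == ' '))
  rwa [List.takeWhile_append_dropWhile] at h

theorem pvLen_split (cs : List Char) :
    (cs.takeWhile (· == ' ')).length + (cs.dropWhile (· == ' ')).length = cs.length := by
  have h := congrArg List.length (List.takeWhile_append_dropWhile (p := (· == ' ')) (l := cs))
  rw [List.length_append] at h
  exact h

theorem pvDrop_ne_nil (cs : List Char) (c0 : Char) (hm : c0 ∈ cs) (hc : c0 ≠ ' ') :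
    cs.dropWhile (· == ' ') ≠ [] := by
  intro hnil
  have := List.dropWhile_eq_nil_iff.mp hnil
  exact hc (by simpa using this c0 hm)

-- ===== VERDICT (by name: the statement is the Claim_ definition above) =====
theorem crawl_spaces_spec : Claim_equal_crawl_spaces := by
  intro line pos _ hpre
  unfold Spec_crawl_spaces crawl_spaces crawl_spaces_alt
  obtain ⟨c0, hc0mem, hc0⟩ : ∃ c ∈ line.toList, c ≠ ' ' := by simpa using List.any_eq_true.mp hpre
  set cs := line.toList with hcs
  by_cases hp : pos = "end"
  · -- reverse branch
    subst hp
    simp only [ne_eq, not_true_eq_false, if_false, pvCrawlRev_eq]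
    set ds := cs.reverse with hds
    set t := (ds.takeWhile (· == ' ')).length with ht
    have hsplit := pvLen_split ds
    have hlenrev : ds.length = cs.length := List.length_reverse (as := cs)
    have hdropne : ds.dropWhile (· == ' ') ≠ [] :=
      pvDrop_ne_nil ds c0 (by simpa [hds] using hc0mem) hc0
    have hdpos : 0 < (ds.dropWhile (· == ' ')).length := List.length_pos_iff.mpr hdropne
    have htlt : t < cs.length := by omega
    have hrevrev : ((ds.dropWhile (· == ' ')).reverse).length = (ds.dropWhile (· == ' ')).length :=
      List.length_reverse (as := ds.dropWhile (· == ' '))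
    have hi : -((cs.length : Int) - (((ds.dropWhile (· == ' ')).reverse).length : Int)) - 1
        = -(((t + 1 : Nat)) : Int) := by
      rw [hrevrev]; push_cast; omega
    have hneg : PySem.List.pyGet? cs (-(((t + 1 : Nat)) : Int)) = cs[cs.length - (t + 1)]? :=
      PySem.List.pyGet?_neg_natCast cs (t + 1) (by omega) (by omega)
    have hrev : cs[cs.length - (t + 1)]? = ds[t]? := by
      rw [hds, List.getElem?_reverse (by omega)]
      congr 1
      omega
    have hget : ds[t]? = (ds.dropWhile (· == ' ')).head? := pvGet_takeWhile_len ds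
    rw [hi, hneg, hrev, hget]
    have hidx : (-1 : Int) - (t : Int) = -(((t + 1 : Nat)) : Int) := by push_cast; ring
    cases hh : (ds.dropWhile (· == ' ')).head? with
    | none => exact absurd (List.head?_eq_none_iff.mp hh) hdropne
    | some c => simp [hidx]
  · -- forward branch
    simp only [ne_eq, hp, not_false_eq_true, if_true, pvCrawlFwd_eq]
    have hsplit := pvLen_split cs
    have hdropne : cs.dropWhile (· == ' ') ≠ [] := pvDrop_ne_nil cs c0 hc0mem hc0
    have hi : ((cs.length : Int) - ((cs.dropWhile (· == ' ')).length : Int))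
        = ((cs.takeWhile (· == ' ')).length : Int) := by push_cast; omega
    rw [hi, PySem.List.pyGet?_natCast, pvGet_takeWhile_len]
    cases hh : (cs.dropWhile (· == ' ')).head? with
    | none => exact absurd (List.head?_eq_none_iff.mp hh) hdropne
    | some c => simp
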